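-- pv_equiv track=rewrite | github.com/AvgBlue/algo1-implementation-ex1 | q2.py | ex2
-- ===== SOURCE A (Python) =====
-- def add_arrays(arr1, arr2):
--     # Get the lengths of the input arrays
--     n1 = len(arr1)
--     n2 = len(arr2)
--
--     # Initialize an array to store the result
--     result = []
--
--     # Add the contents of the input arrays element-wise
--     for i in range(max(n1, n2)):
--         # If both arrays have elements at the current index, add them
--         if i < n1 and i < n2:
--             result.append(arr1[i] + arr2[i])
--         # If only the first array has an element, add it
--         elif i < n1:
--             result.append(arr1[i])
--         # If only the second array has an element, add it
--         else:
--             result.append(arr2[i])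
--
--     return result
--
-- def multiply_polynomials(poly1, poly2):
--     # Get the lengths of the input arrays
--     m = len(poly1)
--     n = len(poly2)
--
--     # Initialize an array to store the coefficients of the result polynomial
--     result = [0] * (m + n - 1)
--
--     # Multiply the coefficients of the polynomials
--     for i in range(m):
--         for j in range(n):
--             result[i + j] += poly1[i] * poly2[j]
--
--     return result
--
-- def swapTo1(arr, n):
--     for i in range(len(arr)):
--         if arr[i] == n:
--             arr[i] = 1
--         else:
--             arr[i] = 0
--     return arr
--
-- def swapTo3(arr, n):
--     for i in range(len(arr)):
--         if abs(arr[i]-n) <= 3: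
--             arr[i] = 1
--         else:
--             arr[i] = 0
--     return arr
--
-- def ex2(text,pattern):
--
--     copyPattern=[]
--     copyText=[]
--     result = [0] * (len(text) + len(pattern) - 1)
--     for i in range(20):
--         copyPattern=list(pattern)
--         copyPattern.reverse()
--         copyPattern=swapTo3(copyPattern,i+1)
--
--         copyText=list(text)
--         copyText=swapTo1(copyText,i+1)
--
--         result=add_arrays(result,multiply_polynomials(copyText,copyPattern))
--
--
--
--     returnResult=[]
--     for i in range(len(result)):
--         if(result[i]==len(pattern)):
--             returnResult.append(i-len(pattern)+1)
--     return returnResult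
-- ===== SOURCE B (Python) =====
-- def ex2(text, pattern):
--     n, m = len(text), len(pattern)
--     result = [0] * (n + m - 1)
--     for i in range(n):
--         t = text[i]
--         if 1 <= t <= 20:
--             for j in range(m):
--                 if abs(t - pattern[m - 1 - j]) <= 3:
--                     result[i + j] += 1
--     return [k - m + 1 for k in range(len(result)) if result[k] == m]
-- ===== Notes on version B (the rewrite author's own statement) =====
-- stated objective: faster
-- what changed: B replaces A's 20-iteration per-value loop (each building 0/1 copies of text and reversed pattern, multiplying them as polynomials and summing the 20 convolution arrays) with one double loop that counts fuzzy matches (1<=t<=20 and |t-p|<=3) directly into a single convolution array.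
import Mathlib
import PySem

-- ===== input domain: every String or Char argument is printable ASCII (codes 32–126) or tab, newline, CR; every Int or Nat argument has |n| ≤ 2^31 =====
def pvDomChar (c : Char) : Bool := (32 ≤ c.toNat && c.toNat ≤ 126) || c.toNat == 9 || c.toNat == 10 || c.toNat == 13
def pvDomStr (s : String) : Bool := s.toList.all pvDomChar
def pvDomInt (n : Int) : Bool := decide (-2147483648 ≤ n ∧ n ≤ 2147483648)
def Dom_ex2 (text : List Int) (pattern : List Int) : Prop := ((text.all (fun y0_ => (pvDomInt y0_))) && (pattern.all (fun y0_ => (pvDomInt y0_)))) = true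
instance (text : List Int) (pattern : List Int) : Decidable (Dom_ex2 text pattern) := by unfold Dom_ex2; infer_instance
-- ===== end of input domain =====

-- B drops A's 20-iteration per-value convolution loop (with its copy/reverse/remap passes and
-- polynomial-multiply helper) in favour of a single double loop that counts fuzzy matches
-- (1 ≤ t ≤ 20 and |t − p| ≤ 3) directly into the convolution array: same result, ~20× less work.

-- ===== PORT A =====
def addArrays (arr1 arr2 : List Int) : List Int :=
  (List.range (max arr1.length arr2.length)).foldl
    (fun result i =>
      if i < arr1.length ∧ i < arr2.length then result ++ [arr1.getD i 0 + arr2.getD i 0]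
      else if i < arr1.length then result ++ [arr1.getD i 0]
      else result ++ [arr2.getD i 0])
    []

def mulPolys (poly1 poly2 : List Int) : List Int :=
  (List.range poly1.length).foldl
    (fun result i =>
      (List.range poly2.length).foldl
        (fun result j => result.set (i + j) (result.getD (i + j) 0 + poly1.getD i 0 * poly2.getD j 0))
        result)
    (List.replicate (poly1.length + poly2.length - 1) 0)

def swapTo1 (arr : List Int) (n : Int) : List Int :=
  arr.map (fun x => if x = n then 1 else 0)

def swapTo3 (arr : List Int) (n : Int) : List Int :=
  arr.map (fun x => if (x - n).natAbs ≤ 3 then 1 else 0)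

def ex2Result (text pattern : List Int) : List Int :=
  (List.range 20).foldl
    (fun (result : List Int) (i : ℕ) =>
      let copyPattern := swapTo3 pattern.reverse ((i : Int) + 1)
      let copyText := swapTo1 text ((i : Int) + 1)
      addArrays result (mulPolys copyText copyPattern))
    (List.replicate (text.length + pattern.length - 1) 0)

def ex2 (text : List Int) (pattern : List Int) : List Int :=
  let result := ex2Result text pattern
  (List.range result.length).foldl
    (fun acc i =>
      if result.getD i 0 = (pattern.length : Int) then acc ++ [(i : Int) - (pattern.length : Int) + 1]
      else acc)
    []

-- ===== PORT B =====
def ex2AltResult (text pattern : List Int) : List Int :=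
  (List.range text.length).foldl
    (fun result i =>
      let t := text.getD i 0
      if 1 ≤ t ∧ t ≤ 20 then
        (List.range pattern.length).foldl
          (fun result j =>
            if (t - pattern.getD (pattern.length - 1 - j) 0).natAbs ≤ 3 then
              result.set (i + j) (result.getD (i + j) 0 + 1)
            else result)
          result
      else result)
    (List.replicate (text.length + pattern.length - 1) 0)

def ex2_alt (text : List Int) (pattern : List Int) : List Int :=
  let result := ex2AltResult text pattern
  ((List.range result.length).filter (fun k => decide (result.getD k 0 = (pattern.length : Int)))).map
    (fun k : ℕ => (k : Int) - (pattern.length : Int) + 1)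

-- ===== PRECONDITION & SPEC =====
def Spec_ex2 (text : List Int) (pattern : List Int) (out : List Int) : Prop := out = ex2_alt text pattern
instance (text : List Int) (pattern : List Int) (out : List Int) : Decidable (Spec_ex2 text pattern out) := by unfold Spec_ex2; infer_instance

-- ===== CLAIM (what is proved, stated in full; the proofs are below) =====
def Claim_equal_ex2 : Prop := ∀ (text : List Int) (pattern : List Int), Dom_ex2 text pattern → Spec_ex2 text pattern (ex2 text pattern)

-- ===== LEMMAS AND PROOFS =====

-- one fold step that adds v at index g (no-op out of range), seen through getD
lemma set_add_getD (r : List Int) (g k : ℕ) (v : Int) (hk : k < r.length) :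
    (r.set g (r.getD g 0 + v)).getD k 0 = r.getD k 0 + if g = k then v else 0 := by
  by_cases hg : g < r.length
  · rw [List.getD_eq_getElem _ _ (by simpa using hk), List.getD_eq_getElem _ _ hk,
      List.getElem_set]
    by_cases e : g = k
    · subst e; simp [List.getElem?_eq_getElem hg, List.getD]
    · simp [e]
  · rw [List.set_eq_of_length_le (by omega)]
    have : g ≠ k := by omega
    simp [this]

-- generic accumulation over `List.range`: if each step adds `h i k` pointwise, the fold sums them
lemma foldl_pointwise (step : List Int → ℕ → List Int) (h : ℕ → ℕ → Int) (L : ℕ)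
    (hstep : ∀ r i, r.length = L → (step r i).length = L ∧
      ∀ k, k < L → (step r i).getD k 0 = r.getD k 0 + h i k)
    (n : ℕ) (r0 : List Int) (h0 : r0.length = L) :
    ((List.range n).foldl step r0).length = L ∧
    ∀ k, k < L → ((List.range n).foldl step r0).getD k 0
      = r0.getD k 0 + ∑ i ∈ Finset.range n, h i k := by
  induction n with
  | zero => simp [h0]
  | succ n ih =>
    rw [List.range_succ, List.foldl_append, List.foldl_cons, List.foldl_nil]
    obtain ⟨hl, hv⟩ := ih
    obtain ⟨hl', hv'⟩ := hstep _ n hl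
    refine ⟨hl', fun k hk => ?_⟩
    rw [hv' k hk, hv k hk, Finset.sum_range_succ]
    ring

lemma getD_map_eq (f : Int → Int) (l : List Int) (i : ℕ) (hi : i < l.length) :
    (l.map f).getD i 0 = f (l.getD i 0) := by
  rw [List.getD_eq_getElem _ _ (by simpa using hi), List.getD_eq_getElem _ _ hi, List.getElem_map]

lemma getD_reverse (l : List Int) (j : ℕ) (hj : j < l.length) :
    l.reverse.getD j 0 = l.getD (l.length - 1 - j) 0 := by
  rw [List.getD_eq_getElem _ _ (by simpa using hj), List.getD_eq_getElem _ _ (by omega),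
    List.getElem_reverse]

-- inner convolution loop of A: always add at index i + j
lemma inner_set_spec (L i : ℕ) (c : ℕ → Int) (m : ℕ) (r : List Int) (hr : r.length = L) :
    ((List.range m).foldl (fun r j => r.set (i + j) (r.getD (i + j) 0 + c j)) r).length = L ∧
    ∀ k, k < L →
      ((List.range m).foldl (fun r j => r.set (i + j) (r.getD (i + j) 0 + c j)) r).getD k 0
        = r.getD k 0 + ∑ j ∈ Finset.range m, if i + j = k then c j else 0 :=
  foldl_pointwise _ (fun j k => if i + j = k then c j else 0) L
    (fun r j hrl => ⟨by simp [hrl], fun k hk => set_add_getD r (i + j) k (c j) (by omega)⟩)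
    m r hr

-- inner loop of B: add 1 at index i + j when the guard holds
lemma inner_set_if_spec (L i : ℕ) (d : ℕ → Prop) [DecidablePred d] (m : ℕ) (r : List Int)
    (hr : r.length = L) :
    ((List.range m).foldl
        (fun r j => if d j then r.set (i + j) (r.getD (i + j) 0 + 1) else r) r).length = L ∧
    ∀ k, k < L →
      ((List.range m).foldl
          (fun r j => if d j then r.set (i + j) (r.getD (i + j) 0 + 1) else r) r).getD k 0
        = r.getD k 0 + ∑ j ∈ Finset.range m, if i + j = k then (if d j then (1 : Int) else 0) else 0 := by
  refine foldl_pointwise _ (fun j k => if i + j = k then (if d j then (1 : Int) else 0) else 0) L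
    (fun r j hrl => ?_) m r hr
  by_cases hd : d j
  · refine ⟨by simp [hd, hrl], fun k hk => ?_⟩
    rw [if_pos hd, set_add_getD r (i + j) k 1 (by omega)]
    simp [hd]
  · refine ⟨by simp [hd, hrl], fun k hk => ?_⟩
    rw [if_neg hd]
    simp [hd]

lemma mulPolys_spec (p q : List Int) :
    (mulPolys p q).length = p.length + q.length - 1 ∧
    ∀ k, k < p.length + q.length - 1 →
      (mulPolys p q).getD k 0
        = ∑ i ∈ Finset.range p.length, ∑ j ∈ Finset.range q.length,
            if i + j = k then p.getD i 0 * q.getD j 0 else 0 := by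
  unfold mulPolys
  have h := foldl_pointwise
    (fun result i => (List.range q.length).foldl
      (fun result j => result.set (i + j) (result.getD (i + j) 0 + p.getD i 0 * q.getD j 0))
      result)
    (fun i k => ∑ j ∈ Finset.range q.length, if i + j = k then p.getD i 0 * q.getD j 0 else 0)
    (p.length + q.length - 1)
    (fun r i hr => inner_set_spec _ i _ q.length r hr)
    p.length (List.replicate (p.length + q.length - 1) 0) (by simp)
  refine ⟨h.1, fun k hk => ?_⟩
  rw [h.2 k hk]
  simp

lemma addArrays_spec (a b : List Int) (L : ℕ) (ha : a.length = L) (hb : b.length = L) :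
    (addArrays a b).length = L ∧
    ∀ k, k < L → (addArrays a b).getD k 0 = a.getD k 0 + b.getD k 0 := by
  unfold addArrays
  rw [ha, hb, max_self]
  have e1 : (List.range L).foldl
      (fun (result : List Int) (i : ℕ) =>
        if i < L ∧ i < L then result ++ [a.getD i 0 + b.getD i 0]
        else if i < L then result ++ [a.getD i 0] else result ++ [b.getD i 0]) []
      = (List.range L).foldl
        (fun (result : List Int) (i : ℕ) => result ++ [a.getD i 0 + b.getD i 0]) [] :=
    by
      apply PySem.List.foldl_congr_mem
      intro acc x hx
      have hxL : x < L := by simpa using hx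
      simp [hxL]
  rw [e1, PySem.List.foldl_append_singleton_eq_map]
  refine ⟨by simp, fun k hk => ?_⟩
  rw [List.getD_eq_getElem _ _ (by simpa using hk)]
  simp

lemma ex2Result_spec (text pattern : List Int) :
    (ex2Result text pattern).length = text.length + pattern.length - 1 ∧
    ∀ k, k < text.length + pattern.length - 1 →
      (ex2Result text pattern).getD k 0
        = ∑ v ∈ Finset.range 20, ∑ i ∈ Finset.range text.length, ∑ j ∈ Finset.range pattern.length,
            if i + j = k then
              (if text.getD i 0 = (v : Int) + 1 then (1 : Int) else 0) *
              (if (pattern.getD (pattern.length - 1 - j) 0 - ((v : Int) + 1)).natAbs ≤ 3 then 1 else 0)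
            else 0 := by
  unfold ex2Result
  have h := foldl_pointwise
    (fun (result : List Int) (i : ℕ) =>
      let copyPattern := swapTo3 pattern.reverse ((i : Int) + 1)
      let copyText := swapTo1 text ((i : Int) + 1)
      addArrays result (mulPolys copyText copyPattern))
    (fun v k => (mulPolys (swapTo1 text ((v : Int) + 1)) (swapTo3 pattern.reverse ((v : Int) + 1))).getD k 0)
    (text.length + pattern.length - 1)
    (fun r v hr => by
      dsimp only
      have hm := mulPolys_spec (swapTo1 text ((v : Int) + 1)) (swapTo3 pattern.reverse ((v : Int) + 1))
      have hc : (mulPolys (swapTo1 text ((v : Int) + 1)) (swapTo3 pattern.reverse ((v : Int) + 1))).length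
          = text.length + pattern.length - 1 := by
        rw [hm.1]; simp [swapTo1, swapTo3]
      exact addArrays_spec r _ _ hr hc)
    20 (List.replicate (text.length + pattern.length - 1) 0) (by simp)
  refine ⟨h.1, fun k hk => ?_⟩
  rw [h.2 k hk]
  have hz : (List.replicate (text.length + pattern.length - 1) (0 : Int)).getD k 0 = 0 := by
    simp [List.getD]
  rw [hz, zero_add]
  refine Finset.sum_congr rfl (fun v _ => ?_)
  dsimp only
  have hm := mulPolys_spec (swapTo1 text ((v : Int) + 1)) (swapTo3 pattern.reverse ((v : Int) + 1))
  have hlen : (swapTo1 text ((v : Int) + 1)).length = text.length ∧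
      (swapTo3 pattern.reverse ((v : Int) + 1)).length = pattern.length := by
    constructor <;> simp [swapTo1, swapTo3]
  rw [hm.2 k (by rw [hlen.1, hlen.2]; exact hk)]
  rw [hlen.1, hlen.2]
  refine Finset.sum_congr rfl (fun i hi => Finset.sum_congr rfl (fun j hj => ?_))
  have hi' : i < text.length := Finset.mem_range.mp hi
  have hj' : j < pattern.length := Finset.mem_range.mp hj
  unfold swapTo1 swapTo3
  rw [getD_map_eq _ text i hi', getD_map_eq _ pattern.reverse j (by simpa using hj'),
    getD_reverse pattern j hj']

lemma ex2AltResult_spec (text pattern : List Int) :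
    (ex2AltResult text pattern).length = text.length + pattern.length - 1 ∧
    ∀ k, k < text.length + pattern.length - 1 →
      (ex2AltResult text pattern).getD k 0
        = ∑ i ∈ Finset.range text.length,
            if 1 ≤ text.getD i 0 ∧ text.getD i 0 ≤ 20 then
              ∑ j ∈ Finset.range pattern.length,
                if i + j = k then
                  (if (text.getD i 0 - pattern.getD (pattern.length - 1 - j) 0).natAbs ≤ 3 then (1 : Int) else 0)
                else 0
            else 0 := by
  unfold ex2AltResult
  have h := foldl_pointwise
    (fun result i =>
      let t := text.getD i 0
      if 1 ≤ t ∧ t ≤ 20 then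
        (List.range pattern.length).foldl
          (fun result j =>
            if (t - pattern.getD (pattern.length - 1 - j) 0).natAbs ≤ 3 then
              result.set (i + j) (result.getD (i + j) 0 + 1)
            else result)
          result
      else result)
    (fun i k =>
      if 1 ≤ text.getD i 0 ∧ text.getD i 0 ≤ 20 then
        ∑ j ∈ Finset.range pattern.length,
          if i + j = k then
            (if (text.getD i 0 - pattern.getD (pattern.length - 1 - j) 0).natAbs ≤ 3 then (1 : Int) else 0)
          else 0
      else 0)
    (text.length + pattern.length - 1)
    (fun r i hr => by
      dsimp only
      by_cases hc : 1 ≤ text.getD i 0 ∧ text.getD i 0 ≤ 20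
      · rw [if_pos hc]
        have hin := inner_set_if_spec (text.length + pattern.length - 1) i
          (fun j => (text.getD i 0 - pattern.getD (pattern.length - 1 - j) 0).natAbs ≤ 3)
          pattern.length r hr
        exact ⟨hin.1, fun k hk => by rw [hin.2 k hk, if_pos hc]⟩
      · rw [if_neg hc]
        exact ⟨hr, fun k hk => by rw [if_neg hc, add_zero]⟩)
    text.length (List.replicate (text.length + pattern.length - 1) 0) (by simp)
  refine ⟨h.1, fun k hk => ?_⟩
  rw [h.2 k hk]
  have hz : (List.replicate (text.length + pattern.length - 1) (0 : Int)).getD k 0 = 0 := by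
    simp [List.getD]
  rw [hz, zero_add]

-- the 20-value 0/1 sum collapses to the direct fuzzy-match indicator
lemma sum20 (t p : Int) :
    ∑ v ∈ Finset.range 20,
        (if t = (v : Int) + 1 then (1 : Int) else 0) *
        (if (p - ((v : Int) + 1)).natAbs ≤ 3 then 1 else 0)
      = if (1 ≤ t ∧ t ≤ 20) ∧ (t - p).natAbs ≤ 3 then 1 else 0 := by
  by_cases h : 1 ≤ t ∧ t ≤ 20
  · have hw : (t - 1).toNat ∈ Finset.range 20 := by
      simp only [Finset.mem_range]; omega
    rw [Finset.sum_eq_single_of_mem _ hw (fun v hv hne => by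
      have hne' : ¬ t = (v : Int) + 1 := by
        have := Finset.mem_range.mp hv
        omega
      simp [hne'])]
    have ht : (((t - 1).toNat : ℕ) : Int) + 1 = t := by omega
    have hcomm : (p - t).natAbs = (t - p).natAbs := by omega
    rw [ht, if_pos rfl, one_mul, hcomm]
    simp [h.1, h.2]
  · rw [if_neg (by tauto)]
    apply Finset.sum_eq_zero
    intro v hv
    have hv20 : v < 20 := Finset.mem_range.mp hv
    have hne : ¬ t = (v : Int) + 1 := by omega
    simp [hne]

lemma results_eq (text pattern : List Int) :
    ex2Result text pattern = ex2AltResult text pattern := by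
  have hA := ex2Result_spec text pattern
  have hB := ex2AltResult_spec text pattern
  apply List.ext_getElem (by rw [hA.1, hB.1])
  intro k h1 h2
  have hk : k < text.length + pattern.length - 1 := hA.1 ▸ h1
  rw [← List.getD_eq_getElem _ 0 h1, ← List.getD_eq_getElem _ 0 h2, hA.2 k hk, hB.2 k hk,
    Finset.sum_comm]
  refine Finset.sum_congr rfl (fun i hi => ?_)
  rw [Finset.sum_comm]
  by_cases hc : 1 ≤ text.getD i 0 ∧ text.getD i 0 ≤ 20
  · rw [if_pos hc]
    refine Finset.sum_congr rfl (fun j _ => ?_)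
    by_cases he : i + j = k
    · simp only [he, if_true]
      rw [sum20 (text.getD i 0) (pattern.getD (pattern.length - 1 - j) 0)]
      split_ifs with ha hb hb2
      · rfl
      · exact absurd ha.2 hb
      · exact absurd ⟨hc, hb2⟩ ha
      · rfl
    · simp [he]
  · rw [if_neg hc]
    apply Finset.sum_eq_zero
    intro j _
    apply Finset.sum_eq_zero
    intro v hv
    have hv20 : v < 20 := Finset.mem_range.mp hv
    have hne : ¬ text.getD i 0 = (v : Int) + 1 := by omega
    by_cases he : i + j = k
    · rw [if_pos he, if_neg hne, zero_mul]
    · rw [if_neg he]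

theorem ex2_spec_aux (text pattern : List Int) : ex2 text pattern = ex2_alt text pattern := by
  unfold ex2 ex2_alt
  rw [results_eq]
  rw [PySem.List.foldl_append_ite]
  simp

-- ===== VERDICT (by name: the statement is the Claim_ definition above) =====
theorem ex2_spec : Claim_equal_ex2 := by
  intro text pattern _
  exact ex2_spec_aux text pattern
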